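-- pv_equiv track=rewrite | github.com/crawlForFree/Initiation | transferDataToSQLSERVER.py | fetchComponents
-- ===== SOURCE A (Python) =====
-- def kmpSearch(pattern, string, start_index, ending_index, arr = []):
--     m = len(pattern)
--     LPSarray = []
--     computeLPS(pattern,m,LPSarray)
--     i = start_index
--     j = 0
--     n = ending_index
--     while i < n:
--         if (pattern[j] is string[i]):
--             i+=1
--             j+=1
--         if j is m:
--             arr.append(i-j)
--             j = LPSarray[j-1]
--         else:
--             if i < n and pattern[j] is not string[i]:
--                 if j is not  0:
--                     j = LPSarray[j-1]
--                 else :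
--                     i+=1
--
-- def computeLPS(pattern, m, LPS = []):
--     length = 0
--     for i in range(0,m):
--         LPS.append(0)
--     i = 1
--     while i < m:
--         if pattern[i] is pattern[length]:
--             length+=1
--             LPS[i] = length
--             i+=1
--         else:
--             if length is not 0:
--                 length = LPS[length-1]
--             else:
--                 LPS[i] = 0
--                 i+=1
--
-- def FETCHER(expression, key):
--     try:
--         pos = expression.find(key)
--     except:
--         return None
--     if pos == -1:
--         return None
--     pos += len(key)
--     while expression[pos] == ' ':
--         pos += 1
--     pos += 1
--     while expression[pos] == ' ':
--         pos += 1
--     id = ""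
--     while pos < len(expression):
--         id += expression[pos]
--         pos += 1
--         if expression[pos] is '"' or expression[pos] is "'":
--             break
--     return id
--
-- def fetchComponents(link, string):
--     filterIn = {'hidden','text','selectors'}
--     typo = []
--     kmpSearch('type=',string,0,len(string),typo)
--     for i in typo:
--         x= i
--         while string[x] is not '>':
--             x = x + 1
--         limo = FETCHER(string[i:x], 'type=')
--         ok = 1
--         for j in filterIn:
--             if j in limo:
--                 ok=0
--                 break
--         if ok is 1:
--             link += ", " + limo
--
--     return link
-- ===== SOURCE B (Python) =====
-- def fetchComponents(link, string):
--     filterIn = ('hidden', 'text', 'selectors')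
--     parts = [link]
--     i = string.find('type=')
--     while i != -1:
--         x = i
--         while string[x] != '>':
--             x += 1
--         limo = _value(string[i:x])
--         if not any(f in limo for f in filterIn):
--             parts.append(limo)
--         i = string.find('type=', i + 1)
--     return ", ".join(parts)
--
-- def _value(seg):
--     q = 5
--     while seg[q] == ' ':
--         q += 1
--     q += 1
--     while seg[q] == ' ':
--         q += 1
--     end = q + 1
--     while seg[end] != '"' and seg[end] != "'":
--         end += 1
--     return seg[q:end]
-- ===== Notes on version B (the rewrite author's own statement) =====
-- stated objective: faster
-- what changed: B drops the hand-written KMP machinery (kmpSearch/computeLPS) and byte-by-byte id accumulation: it walks the occurrences of 'type=' with str.find in a single while loop, extracts each value by skipping spaces and slicing up to the next quote, and assembles the result with a parts list and ', '.join instead of repeated string concatenation.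
import Mathlib
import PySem

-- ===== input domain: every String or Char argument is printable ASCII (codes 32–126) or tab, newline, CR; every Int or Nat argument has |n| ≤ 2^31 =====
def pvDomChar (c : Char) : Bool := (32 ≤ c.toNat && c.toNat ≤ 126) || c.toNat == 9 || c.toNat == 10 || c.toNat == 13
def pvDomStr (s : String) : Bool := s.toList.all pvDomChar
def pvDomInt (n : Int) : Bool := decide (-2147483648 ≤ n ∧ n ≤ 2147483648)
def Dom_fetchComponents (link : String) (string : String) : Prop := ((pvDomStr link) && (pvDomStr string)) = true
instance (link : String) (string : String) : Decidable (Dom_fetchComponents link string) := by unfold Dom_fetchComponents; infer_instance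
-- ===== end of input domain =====

-- B replaces A's hand-written KMP machinery (kmpSearch/computeLPS) by a str.find scan loop that
-- extracts and filters each value as it goes; equivalence of the RETURN value is proved on Pre_
-- (inputs where A raises no exception).  Strings are handled as char lists (String.ofList at the end): exact.

-- ===== PORT A =====
def tPat : List Char := ['t', 'y', 'p', 'e', '=']

-- Python set literal {'hidden','text','selectors'}: three distinct literals used only for a
-- membership test whose result does not depend on iteration order; ported as the literal list.
def filterKeys : List (List Char) := ["hidden".toList, "text".toList, "selectors".toList]

-- computeLPS's while loop. fuel only makes the recursion structural; 2*m steps always suffice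
-- (the measure 2*(m-i)+length strictly decreases).  The `min … (len-1)` is a totality guard:
-- LPS entries are ≤ their index, so it equals Python's LPS[length-1] whenever reached.
def computeLPSloop (pat : List Char) (m : Nat) : Nat → Nat → Nat → List Nat → List Nat
  | 0, _, _, lps => lps
  | fuel + 1, i, len, lps =>
    if i < m then
      if pat.getD i ' ' = pat.getD len ' ' then
        computeLPSloop pat m fuel (i + 1) (len + 1) (lps.set i (len + 1))
      else if len ≠ 0 then
        computeLPSloop pat m fuel i (min (lps.getD (len - 1) 0) (len - 1)) lps
      else
        computeLPSloop pat m fuel (i + 1) len (lps.set i 0)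
    else lps

def computeLPS (pat : List Char) (m : Nat) : List Nat :=
  computeLPSloop pat m (2 * m) 1 0 (List.replicate m 0)

-- kmpSearch's while loop. fuel structural, 2*n+1 steps suffice (measure 2*(n-i)+j strictly
-- decreases); `min` totality guard as above (Python would loop forever / raise only on an empty
-- pattern, never passed here).
def kmpLoop (pat s : List Char) (lps : List Nat) (n : Nat) : Nat → Nat → Nat → List Nat → List Nat
  | 0, _, _, arr => arr
  | fuel + 1, i, j, arr =>
    if i < n then
      let i1 := if pat.getD j ' ' = s.getD i ' ' then i + 1 else i
      let j1 := if pat.getD j ' ' = s.getD i ' ' then j + 1 else j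
      if j1 = pat.length then
        kmpLoop pat s lps n fuel i1 (min (lps.getD (j1 - 1) 0) (j1 - 1)) (arr ++ [i1 - j1])
      else if i1 < n ∧ pat.getD j1 ' ' ≠ s.getD i1 ' ' then
        if j1 ≠ 0 then kmpLoop pat s lps n fuel i1 (min (lps.getD (j1 - 1) 0) (j1 - 1)) arr
        else kmpLoop pat s lps n fuel (i1 + 1) j1 arr
      else kmpLoop pat s lps n fuel i1 j1 arr
    else arr

def kmpSearch (pattern s : List Char) (startIdx endingIdx : Nat) (arr : List Nat) : List Nat :=
  let m := pattern.length
  let lps := computeLPS pattern m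
  kmpLoop pattern s lps endingIdx (2 * endingIdx + 1) startIdx 0 arr

-- `while string[x] is not '>': x += 1` — shared by both sources.  Python raises IndexError past
-- the end; the port stops there instead (getD/fuel totality guard, unreachable under Pre_).
def findGt (cs : List Char) : Nat → Nat → Nat
  | 0, x => x
  | fuel + 1, x => if x < cs.length ∧ cs.getD x ' ' ≠ '>' then findGt cs fuel (x + 1) else x

-- `while expression[pos] == ' ': pos += 1` — shared by both sources; same totality guard.
def skipSpaces (t : List Char) : Nat → Nat → Nat
  | 0, q => q
  | fuel + 1, q => if q < t.length ∧ t.getD q ' ' = ' ' then skipSpaces t fuel (q + 1) else q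

-- FETCHER's id-accumulation loop.  Python raises IndexError when pos+1 = len at the quote test;
-- getD then yields ' ' (not a quote) and the loop exits at the bound check instead — unreachable
-- under Pre_.
def idLoop (t : List Char) : Nat → Nat → List Char → List Char
  | 0, _, acc => acc
  | fuel + 1, pos, acc =>
    if pos < t.length then
      let acc' := acc ++ [t.getD pos ' ']
      if t.getD (pos + 1) ' ' = '"' ∨ t.getD (pos + 1) ' ' = '\'' then acc'
      else idLoop t fuel (pos + 1) acc'
    else acc

-- FETCHER(expression, 'type=').  The try/except around .find can never fire.  Python returns
-- None when the key is absent and the caller would then raise TypeError; the port returns []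
-- there (totality guard, unreachable: every expression passed starts with 'type=').
def FETCHERport (t : List Char) : List Char :=
  let pos := PySem.Chars.find t tPat
  if pos = -1 then []
  else
    let p1 := skipSpaces t (t.length + 1) (pos.toNat + tPat.length)
    let p2 := skipSpaces t (t.length + 1) (p1 + 1)
    idLoop t (t.length + 1) p2 []

-- `ok = 1; for j in filterIn: if j in limo: ok = 0; break`
def okLoop (limo : List Char) : List (List Char) → Int
  | [] => 1
  | k :: rest => if PySem.Chars.isIn k limo then 0 else okLoop limo rest

-- one iteration of A's `for i in typo` body acting on the accumulated link
def stepA (cs : List Char) (acc : List Char) (p : Nat) : List Char :=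
  let x := findGt cs (cs.length + 1) p
  let limo := FETCHERport ((cs.drop p).take (x - p))  -- string[i:x], 0 ≤ i ≤ x: exact slice
  if okLoop limo filterKeys = 1 then acc ++ (',' :: ' ' :: limo) else acc

def fetchComponents (link : String) (string : String) : String :=
  let cs := string.toList
  let typo := kmpSearch tPat cs 0 cs.length []
  String.ofList (typo.foldl (stepA cs) link.toList)

-- ===== PORT B =====
-- `while seg[end] != '"' and seg[end] != "'": end += 1` (same totality guard as the scans above)
def quoteScan (t : List Char) : Nat → Nat → Nat
  | 0, e => e
  | fuel + 1, e =>
    if e < t.length ∧ ¬(t.getD e ' ' = '"' ∨ t.getD e ' ' = '\'') then quoteScan t fuel (e + 1)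
    else e

def valuePort (t : List Char) : List Char :=
  let q1 := skipSpaces t (t.length + 1) 5
  let q := skipSpaces t (t.length + 1) (q1 + 1)
  let e := quoteScan t (t.length + 1) (q + 1)
  (t.drop q).take (e - q)  -- seg[q:end], 0 ≤ q ≤ end: exact slice

-- one iteration of B's while-loop body acting on the parts list
def stepB (cs : List Char) (parts : List (List Char)) (p : Nat) : List (List Char) :=
  let x := findGt cs (cs.length + 1) p
  let limo := valuePort ((cs.drop p).take (x - p))
  if filterKeys.any (fun k => PySem.Chars.isIn k limo) then parts else parts ++ [limo]

-- B's `i = string.find('type='); while i != -1: …; i = string.find('type=', i+1)`.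
-- fuel structural: each iteration advances the start index, ≤ len(string)+1 iterations.
def bLoop (cs : List Char) : Nat → Nat → List (List Char) → List (List Char)
  | 0, _, parts => parts
  | fuel + 1, k, parts =>
    let f := PySem.Chars.findFrom cs tPat (k : Int) none
    if f = -1 then parts
    else bLoop cs fuel (f.toNat + 1) (stepB cs parts f.toNat)

def fetchComponents_alt (link : String) (string : String) : String :=
  let cs := string.toList
  let parts := bLoop cs (cs.length + 1) 0 [link.toList]
  String.ofList (PySem.Chars.join [',', ' '] parts)

-- ===== PRECONDITION & SPEC =====
-- goodAtB cs p: bounded-quantifier check (any/all over index ranges) that behind the occurrence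
-- of 'type=' at p there is a '>' at some x (with none before it), a first non-space a ≥ p+5
-- before x, a first non-space b ≥ a+1 before x, and a quote after b before x.
def goodAtB (cs : List Char) (p : Nat) : Bool :=
  (List.range cs.length).any fun x => decide (p ≤ x) && (cs.getD x ' ' == '>') &&
    ((List.range x).all fun k => decide (k < p) || (cs.getD k ' ' != '>')) &&
    ((List.range x).any fun a => decide (p + 5 ≤ a) && (cs.getD a ' ' != ' ') &&
      ((List.range a).all fun k => decide (k < p + 5) || (cs.getD k ' ' == ' ')) &&
      ((List.range x).any fun b => decide (a + 1 ≤ b) && (cs.getD b ' ' != ' ') &&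
        ((List.range b).all fun k => decide (k < a + 1) || (cs.getD k ' ' == ' ')) &&
        ((List.range x).any fun c => decide (b + 1 ≤ c) &&
          (cs.getD c ' ' == '"' || cs.getD c ' ' == '\''))))

-- Pre_ holds exactly when Python A returns (no exception): at every occurrence p of 'type='
-- the shape goodAtB holds — on the excluded inputs A raises IndexError in the `while string[x]
-- is not '>'` scan or inside FETCHER (running past the end of the expression).
def Pre_fetchComponents (link : String) (string : String) : Prop :=
  ∀ p ∈ List.range string.toList.length, tPat <+: string.toList.drop p →
    goodAtB string.toList p = true

instance (link : String) (string : String) : Decidable (Pre_fetchComponents link string) := by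
  unfold Pre_fetchComponents; infer_instance

def pvWitness_fetchComponents : String × String := ("x", "type=\"a\">")

def Spec_fetchComponents (link : String) (string : String) (out : String) : Prop :=
  out = fetchComponents_alt link string
instance (link : String) (string : String) (out : String) :
    Decidable (Spec_fetchComponents link string out) := by
  unfold Spec_fetchComponents; infer_instance

-- ===== CLAIM (what is proved, stated in full; the proofs are below) =====
def Claim_equal_fetchComponents : Prop :=
  ∀ (link : String) (string : String), Dom_fetchComponents link string →
    Pre_fetchComponents link string →
    Spec_fetchComponents link string (fetchComponents link string)

-- ===== LEMMAS AND PROOFS =====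

-- the list of occurrence positions of 'type=' in cs from index k on, in increasing order
def occsGE (cs : List Char) (k : Nat) : List Nat :=
  (List.range' k (cs.length - k)).filter fun p => decide (tPat <+: cs.drop p)

-- what Pre_ guarantees at one occurrence p
def GoodAt (cs : List Char) (p : Nat) : Prop :=
  ∃ x, x < cs.length ∧ p ≤ x ∧ cs.getD x ' ' = '>' ∧
    (∀ k, p ≤ k → k < x → cs.getD k ' ' ≠ '>') ∧
    ∃ a, a < x ∧ p + 5 ≤ a ∧ cs.getD a ' ' ≠ ' ' ∧
      (∀ k, p + 5 ≤ k → k < a → cs.getD k ' ' = ' ') ∧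
      ∃ b, b < x ∧ a + 1 ≤ b ∧ cs.getD b ' ' ≠ ' ' ∧
        (∀ k, a + 1 ≤ k → k < b → cs.getD k ' ' = ' ') ∧
        ∃ c, c < x ∧ b + 1 ≤ c ∧ (cs.getD c ' ' = '"' ∨ cs.getD c ' ' = '\'')

lemma lps_tPat : computeLPS tPat 5 = [0, 0, 0, 0, 0] := by decide

lemma match_iff (cs : List Char) (p : Nat) :
    tPat <+: cs.drop p ↔ p + 5 ≤ cs.length ∧ ∀ k, k < 5 → cs.getD (p + k) ' ' = tPat.getD k ' ' := by
  rw [List.prefix_iff_eq_take]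
  constructor
  · intro h
    have hlen : (5:Nat) = min 5 (cs.length - p) := by
      have := congrArg List.length h
      simpa using this
    have hle : p + 5 ≤ cs.length := by omega
    refine ⟨hle, fun k hk => ?_⟩
    have hh : tPat.getD k ' ' = ((cs.drop p).take tPat.length).getD k ' ' := by rw [← h]
    rw [hh]
    simp only [List.getD_eq_getElem?_getD]
    rw [List.getElem?_take_of_lt (by simpa using hk), List.getElem?_drop]
  · rintro ⟨hle, hch⟩
    apply List.ext_getElem?
    intro i
    by_cases hi : i < 5
    · rw [List.getElem?_take_of_lt (by simpa using hi), List.getElem?_drop]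
      have h1 := hch i hi
      simp only [List.getD_eq_getElem?_getD] at h1
      have h2 : p + i < cs.length := by omega
      have h3 : i < tPat.length := by simpa using hi
      simp [List.getElem?_eq_getElem h2, List.getElem?_eq_getElem h3] at h1 ⊢
      exact h1.symm
    · rw [List.getElem?_eq_none (by simpa using hi), List.getElem?_eq_none (by simp [tPat]; omega)]

lemma occsGE_stop (cs : List Char) (k : Nat) (h : cs.length ≤ k) : occsGE cs k = [] := by
  unfold occsGE
  rw [Nat.sub_eq_zero_of_le h]
  rfl

lemma occsGE_cons (cs : List Char) (k : Nat) (h : k < cs.length) :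
    occsGE cs k = (if tPat <+: cs.drop k then [k] else []) ++ occsGE cs (k + 1) := by
  unfold occsGE
  have h1 : cs.length - k = (cs.length - (k + 1)) + 1 := by omega
  rw [h1, List.range'_succ, List.filter_cons]
  by_cases hP : tPat <+: cs.drop k <;> simp [hP]

lemma occsGE_skip (cs : List Char) (k : Nat) (h : ¬ tPat <+: cs.drop k) :
    occsGE cs k = occsGE cs (k + 1) := by
  by_cases hk : k < cs.length
  · rw [occsGE_cons cs k hk]; simp [h]
  · rw [occsGE_stop cs k (by omega), occsGE_stop cs (k + 1) (by omega)]

lemma occsGE_skip_range (cs : List Char) (s t : Nat) (hst : s ≤ t)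
    (h : ∀ q, s ≤ q → q < t → ¬ tPat <+: cs.drop q) : occsGE cs s = occsGE cs t := by
  induction t with
  | zero =>
    have h0 : s = 0 := by omega
    subst h0
    rfl
  | succ t ih =>
    by_cases hst' : s = t + 1
    · simp [hst']
    · have hs : s ≤ t := by omega
      rw [ih hs (fun q hq1 hq2 => h q hq1 (by omega)), occsGE_skip cs t (h t hs (by omega))]

lemma lps_getD (i : Nat) : ([0, 0, 0, 0, 0] : List Nat).getD i 0 = 0 := by
  rcases i with _ | _ | _ | _ | _ | i <;> simp [List.getD]

lemma pat_ne_head : ∀ o, 1 ≤ o → o < 5 → tPat.getD o ' ' ≠ tPat.getD 0 ' ' := by decide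

-- no occurrence of 'type=' can start strictly inside a partial match of length j + 1
lemma no_occ_inside (cs : List Char) (s j : Nat) (hj : j ≤ 4)
    (hinv : ∀ k, k < j → cs.getD (s + k) ' ' = tPat.getD k ' ')
    (hlast : cs.getD (s + j) ' ' = tPat.getD j ' ') :
    ∀ q, s + 1 ≤ q → q < s + j + 1 → ¬ tPat <+: cs.drop q := by
  intro q hq1 hq2 hmat
  rw [match_iff] at hmat
  obtain ⟨hqn, hqc⟩ := hmat
  have ho : q = s + (q - s) := by omega
  have hhead := hqc 0 (by omega)
  rw [Nat.add_zero] at hhead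
  have hchar : cs.getD (s + (q - s)) ' ' = tPat.getD (q - s) ' ' := by
    by_cases hlt : q - s < j
    · exact hinv _ hlt
    · have : q - s = j := by omega
      rw [this]; exact hlast
  rw [← ho] at hchar
  exact pat_ne_head (q - s) (by omega) (by omega) (hchar ▸ hhead)

lemma kmp_main (cs : List Char) :
    ∀ fuel s j arr, 2 * (cs.length - (s + j)) + j < fuel → j ≤ 4 →
      (∀ k, k < j → cs.getD (s + k) ' ' = tPat.getD k ' ') →
      kmpLoop tPat cs [0, 0, 0, 0, 0] cs.length fuel (s + j) j arr = arr ++ occsGE cs s := by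
  intro fuel
  induction fuel with
  | zero => intro s j arr hfuel; omega
  | succ fuel ih =>
    intro s j arr hfuel hj hinv
    simp only [kmpLoop]
    by_cases hin : s + j < cs.length
    · rw [if_pos hin]
      by_cases hc : tPat.getD j ' ' = cs.getD (s + j) ' '
      · by_cases hj4 : j = 4
        · -- completed match: record s, restart at s + 5 with j = 0
          subst hj4
          rw [if_pos hc, if_pos hc, if_pos (by decide : (4 + 1 = tPat.length))]
          have hrec := ih (s + 5) 0 (arr ++ [s + 4 + 1 - (4 + 1)]) (by omega) (by omega)
            (fun k hk => absurd hk (by omega))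
          rw [Nat.add_zero] at hrec
          have e1 : s + 4 + 1 = s + 5 := by omega
          rw [e1] at hrec ⊢
          rw [lps_getD, Nat.zero_min, hrec]
          have hmat : tPat <+: cs.drop s := by
            rw [match_iff]
            exact ⟨by omega, fun k hk => by
              rcases Nat.lt_or_ge k 4 with h4 | h4
              · exact hinv k h4
              · have : k = 4 := by omega
                rw [this]; exact hc.symm⟩
          rw [occsGE_cons cs s (by omega), if_pos hmat,
            occsGE_skip_range cs (s + 1) (s + 5) (by omega)
              (no_occ_inside cs s 4 (by omega) hinv hc.symm)]
          simp
        · -- mid-pattern match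
          rw [if_pos hc, if_pos hc, if_neg (by simp [tPat]; omega)]
          by_cases hC : s + j + 1 < cs.length ∧ tPat.getD (j + 1) ' ' ≠ cs.getD (s + j + 1) ' '
          · -- mismatch at the next position: restart at i with j = 0
            rw [if_pos hC, if_pos (by omega : j + 1 ≠ 0)]
            rw [Nat.add_sub_cancel, lps_getD, Nat.zero_min]
            have hrec := ih (s + j + 1) 0 arr (by omega) (by omega)
              (fun k hk => absurd hk (by omega))
            rw [Nat.add_zero] at hrec
            rw [hrec]
            congr 1
            refine (occsGE_skip_range cs s (s + j + 1) (by omega) ?_).symm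
            intro q hq1 hq2 hmat
            by_cases hq0 : q = s
            · subst hq0
              rw [match_iff] at hmat
              have := hmat.2 (j + 1) (by omega)
              rw [← Nat.add_assoc] at this
              exact hC.2 this.symm
            · exact no_occ_inside cs s j hj hinv hc.symm q (by omega) (by omega) hmat
          · -- extend the partial match
            rw [if_neg hC]
            have hrec := ih s (j + 1) arr (by omega) (by omega)
              (fun k hk => by
                rcases Nat.lt_or_ge k j with hk' | hk'
                · exact hinv k hk'
                · have : k = j := by omega
                  rw [this]; exact hc.symm)
            rw [← Nat.add_assoc] at hrec
            exact hrec
      · -- mismatch at the current position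
        rw [if_neg hc, if_neg hc, if_neg (by simp [tPat]; omega)]
        rw [if_pos ⟨hin, fun h => hc h⟩]
        by_cases hj0 : j = 0
        · subst hj0
          rw [if_neg (by omega)]
          have hrec := ih (s + 1) 0 arr (by omega) (by omega)
            (fun k hk => absurd hk (by omega))
          rw [Nat.add_zero] at hrec
          rw [Nat.add_zero, hrec]
          congr 1
          refine (occsGE_skip cs s ?_).symm
          intro hmat
          rw [match_iff] at hmat
          have h0' := hmat.2 0 (by omega)
          rw [Nat.add_zero] at h0'
          exact hc (by simpa using h0'.symm)
        · rw [if_pos hj0]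
          rw [lps_getD, Nat.zero_min]
          have hrec := ih (s + j) 0 arr (by omega) (by omega)
            (fun k hk => absurd hk (by omega))
          rw [Nat.add_zero] at hrec
          rw [hrec]
          congr 1
          refine (occsGE_skip_range cs s (s + j) (by omega) ?_).symm
          intro q hq1 hq2 hmat
          rw [match_iff] at hmat
          by_cases hq0 : q = s
          · subst hq0
            have := hmat.2 j (by omega)
            exact hc this.symm
          · exact no_occ_inside cs s (j - 1) (by omega) (fun k hk => hinv k (by omega))
              (hinv (j - 1) (by omega)) q (by omega) (by omega) (by rw [match_iff]; exact hmat)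
    · rw [if_neg hin]
      have hempty : occsGE cs s = [] := by
        by_cases hsn : cs.length ≤ s
        · exact occsGE_stop _ _ hsn
        · rw [occsGE_skip_range cs s cs.length (by omega) (fun q hq1 hq2 hmat => by
            rw [match_iff] at hmat; omega)]
          exact occsGE_stop _ _ le_rfl
      simp [hempty]

lemma kmpA (cs : List Char) : kmpSearch tPat cs 0 cs.length [] = occsGE cs 0 := by
  show kmpLoop tPat cs (computeLPS tPat 5) cs.length (2 * cs.length + 1) 0 0 [] = occsGE cs 0
  rw [lps_tPat]
  have := kmp_main cs (2 * cs.length + 1) 0 0 [] (by omega) (by omega)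
    (fun k hk => absurd hk (by omega))
  simpa using this

lemma drop_drop_prefix (cs : List Char) (k q : Nat) (hkq : k ≤ q) (h : tPat <+: cs.drop q) :
    tPat <:+: (cs.drop k) := by
  have : cs.drop q = (cs.drop k).drop (q - k) := by
    rw [List.drop_drop]
    congr 1
    omega
  rw [this] at h
  exact h.isInfix.trans (List.drop_suffix _ _).isInfix

lemma bLoop_main (cs : List Char) :
    ∀ fuel k parts, k ≤ cs.length → cs.length - k < fuel →
      bLoop cs fuel k parts = (occsGE cs k).foldl (stepB cs) parts := by
  intro fuel
  induction fuel with
  | zero => intro k parts h1 h2; omega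
  | succ fuel ih =>
    intro k parts hk hfuel
    simp only [bLoop]
    by_cases hf : PySem.Chars.findFrom cs tPat (k : Int) none = -1
    · rw [if_pos hf]
      have hnone : ¬ tPat <:+: cs.drop k :=
        (PySem.Chars.findFrom_natCast_eq_neg_one_iff cs tPat k hk).mp hf
      have hempty : occsGE cs k = [] := by
        rw [occsGE_skip_range cs k cs.length hk
          (fun q hq1 hq2 hmat => hnone (drop_drop_prefix cs k q hq1 hmat))]
        exact occsGE_stop _ _ le_rfl
      rw [hempty]
      rfl
    · rw [if_neg hf]
      obtain ⟨hkf, hpre, hmin⟩ := PySem.Chars.findFrom_natCast_spec cs tPat k hk hf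
      set p := (PySem.Chars.findFrom cs tPat (k : Int) none).toNat with hp
      have hkp : k ≤ p := by omega
      have hpn : p + 5 ≤ cs.length := ((match_iff cs p).mp hpre).1
      have hocc : occsGE cs k = p :: occsGE cs (p + 1) := by
        rw [occsGE_skip_range cs k p hkp (fun q hq1 hq2 => hmin q hq1 hq2),
          occsGE_cons cs p (by omega), if_pos hpre]
        rfl
      rw [hocc, List.foldl_cons]
      exact ih (p + 1) (stepB cs parts p) (by omega) (by omega)

lemma findGt_spec (cs : List Char) :
    ∀ fuel x x0, x ≤ x0 → x0 < cs.length → cs.getD x0 ' ' = '>' →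
      (∀ k, x ≤ k → k < x0 → cs.getD k ' ' ≠ '>') → x0 - x < fuel →
      findGt cs fuel x = x0 := by
  intro fuel
  induction fuel with
  | zero => intro x x0 h1 h2 h3 h4 h5; omega
  | succ fuel ih =>
    intro x x0 h1 h2 h3 h4 h5
    simp only [findGt]
    by_cases hx : x = x0
    · subst hx
      rw [if_neg (fun hcon => hcon.2 h3)]
    · have hc : cs.getD x ' ' ≠ '>' := h4 x (le_refl x) (by omega)
      rw [if_pos ⟨by omega, hc⟩]
      exact ih (x + 1) x0 (by omega) h2 h3 (fun k hk1 hk2 => h4 k (by omega) hk2) (by omega)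

lemma skipSpaces_spec (t : List Char) :
    ∀ fuel q a, q ≤ a → a < t.length → t.getD a ' ' ≠ ' ' →
      (∀ k, q ≤ k → k < a → t.getD k ' ' = ' ') → a - q < fuel →
      skipSpaces t fuel q = a := by
  intro fuel
  induction fuel with
  | zero => intro q a h1 h2 h3 h4 h5; omega
  | succ fuel ih =>
    intro q a h1 h2 h3 h4 h5
    simp only [skipSpaces]
    by_cases hq : q = a
    · subst hq
      rw [if_neg (fun hcon => h3 hcon.2)]
    · have hc : t.getD q ' ' = ' ' := h4 q (le_refl q) (by omega)
      rw [if_pos ⟨by omega, hc⟩]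
      exact ih (q + 1) a (by omega) h2 h3 (fun k hk1 hk2 => h4 k (by omega) hk2) (by omega)

lemma quoteScan_spec (t : List Char) :
    ∀ fuel e c0, e ≤ c0 → c0 < t.length → (t.getD c0 ' ' = '"' ∨ t.getD c0 ' ' = '\'') →
      (∀ k, e ≤ k → k < c0 → ¬(t.getD k ' ' = '"' ∨ t.getD k ' ' = '\'')) → c0 - e < fuel →
      quoteScan t fuel e = c0 := by
  intro fuel
  induction fuel with
  | zero => intro e c0 h1 h2 h3 h4 h5; omega
  | succ fuel ih =>
    intro e c0 h1 h2 h3 h4 h5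
    simp only [quoteScan]
    by_cases he : e = c0
    · subst he
      rw [if_neg (fun hcon => hcon.2 h3)]
    · have hc := h4 e (le_refl e) (by omega)
      rw [if_pos ⟨by omega, hc⟩]
      exact ih (e + 1) c0 (by omega) h2 h3 (fun k hk1 hk2 => h4 k (by omega) hk2) (by omega)

lemma least_quote (t : List Char) (e : Nat) :
    ∀ c, e ≤ c → c < t.length → (t.getD c ' ' = '"' ∨ t.getD c ' ' = '\'') →
      ∃ c0, e ≤ c0 ∧ c0 ≤ c ∧ c0 < t.length ∧ (t.getD c0 ' ' = '"' ∨ t.getD c0 ' ' = '\'') ∧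
        ∀ k, e ≤ k → k < c0 → ¬(t.getD k ' ' = '"' ∨ t.getD k ' ' = '\'') := by
  intro c
  induction c using Nat.strong_induction_on with
  | _ c ihc =>
    intro hec hcl hq
    by_cases hall : ∀ k, e ≤ k → k < c → ¬(t.getD k ' ' = '"' ∨ t.getD k ' ' = '\'')
    · exact ⟨c, hec, le_rfl, hcl, hq, hall⟩
    · rw [not_forall] at hall
      obtain ⟨k, hk⟩ := hall
      rw [Classical.not_imp, Classical.not_imp, not_not] at hk
      obtain ⟨hk1, hk2, hkq⟩ := hk
      obtain ⟨c0, h1, h2, h3, h4, h5⟩ := ihc k hk2 hk1 (by omega) hkq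
      exact ⟨c0, h1, by omega, h3, h4, h5⟩

lemma take_drop_cons (t : List Char) (pos d : Nat) (hp : pos < t.length) (hd : 0 < d) :
    (t.drop pos).take d = t.getD pos ' ' :: (t.drop (pos + 1)).take (d - 1) := by
  cases d with
  | zero => omega
  | succ d =>
    rw [List.drop_eq_getElem_cons hp, List.take_succ_cons]
    simp [List.getD_eq_getElem?_getD, List.getElem?_eq_getElem hp]

lemma idLoop_spec (t : List Char) :
    ∀ fuel pos acc c0, pos < c0 → c0 < t.length →
      (t.getD c0 ' ' = '"' ∨ t.getD c0 ' ' = '\'') →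
      (∀ k, pos < k → k < c0 → ¬(t.getD k ' ' = '"' ∨ t.getD k ' ' = '\'')) → c0 - pos < fuel →
      idLoop t fuel pos acc = acc ++ (t.drop pos).take (c0 - pos) := by
  intro fuel
  induction fuel with
  | zero => intro pos acc c0 h1 h2 h3 h4 h5; omega
  | succ fuel ih =>
    intro pos acc c0 h1 h2 h3 h4 h5
    have hpos : pos < t.length := by omega
    simp only [idLoop]
    rw [if_pos hpos, take_drop_cons t pos (c0 - pos) hpos (by omega)]
    by_cases hnext : pos + 1 = c0
    · rw [hnext, if_pos h3]
      simp
      omega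
    · have hq := h4 (pos + 1) (by omega) (by omega)
      rw [if_neg hq, ih (pos + 1) (acc ++ [t.getD pos ' ']) c0 (by omega) h2 h3
        (fun k hk1 hk2 => h4 k (by omega) hk2) (by omega)]
      simp
      omega

-- the two extraction routines agree on a segment satisfying Pre_'s shape conditions
lemma value_eq (t : List Char) (h0 : tPat <+: t)
    (ha : ∃ a, a < t.length ∧ 5 ≤ a ∧ t.getD a ' ' ≠ ' ' ∧
      (∀ k, 5 ≤ k → k < a → t.getD k ' ' = ' ') ∧
      ∃ b, b < t.length ∧ a + 1 ≤ b ∧ t.getD b ' ' ≠ ' ' ∧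
        (∀ k, a + 1 ≤ k → k < b → t.getD k ' ' = ' ') ∧
        ∃ c, c < t.length ∧ b + 1 ≤ c ∧ (t.getD c ' ' = '"' ∨ t.getD c ' ' = '\'')) :
    FETCHERport t = valuePort t := by
  -- .find('type=') returns 0 on a segment that starts with 'type='
  have hfind : PySem.Chars.find t tPat = 0 := by
    have hnneg : 0 ≤ PySem.Chars.find t tPat :=
      (PySem.Chars.find_nonneg_iff t tPat).mpr h0.isInfix
    obtain ⟨hpre, hmin⟩ := PySem.Chars.find_spec hnneg
    by_cases hz : (PySem.Chars.find t tPat).toNat = 0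
    · omega
    · exact absurd (by simpa using h0) (hmin 0 (by omega))
  obtain ⟨a, hal, ha5, hans, hasp, b, hbl, hba, hbns, hbsp, c, hcl, hcb, hcq⟩ := ha
  obtain ⟨c0, hc0e, hc0c, hc0l, hc0q, hc0min⟩ := least_quote t (b + 1) c hcb hcl hcq
  have hs1 : skipSpaces t (t.length + 1) 5 = a :=
    skipSpaces_spec t (t.length + 1) 5 a ha5 hal hans hasp (by omega)
  have hs2 : skipSpaces t (t.length + 1) (a + 1) = b :=
    skipSpaces_spec t (t.length + 1) (a + 1) b hba hbl hbns hbsp (by omega)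
  have hqs : quoteScan t (t.length + 1) (b + 1) = c0 :=
    quoteScan_spec t (t.length + 1) (b + 1) c0 hc0e hc0l hc0q hc0min (by omega)
  have hid : idLoop t (t.length + 1) b [] = [] ++ (t.drop b).take (c0 - b) :=
    idLoop_spec t (t.length + 1) b [] c0 (by omega) hc0l hc0q
      (fun k hk1 hk2 => hc0min k (by omega) hk2) (by omega)
  show (if PySem.Chars.find t tPat = -1 then []
    else idLoop t (t.length + 1)
      (skipSpaces t (t.length + 1)
        (skipSpaces t (t.length + 1) ((PySem.Chars.find t tPat).toNat + tPat.length) + 1)) []) =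
    (t.drop (skipSpaces t (t.length + 1) (skipSpaces t (t.length + 1) 5 + 1))).take
      (quoteScan t (t.length + 1)
        (skipSpaces t (t.length + 1) (skipSpaces t (t.length + 1) 5 + 1) + 1) -
       skipSpaces t (t.length + 1) (skipSpaces t (t.length + 1) 5 + 1))
  rw [hfind]
  norm_num
  rw [(by decide : tPat.length = 5), hs1, hs2, hqs, hid]
  simp

lemma ok_iff (limo : List Char) :
    okLoop limo filterKeys = 1 ↔ filterKeys.any (fun k => PySem.Chars.isIn k limo) = false := by
  simp only [filterKeys, okLoop, List.any_cons, List.any_nil]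
  split_ifs <;> simp_all

lemma step_eq (cs : List Char) (p : Nat) (hm : tPat <+: cs.drop p) (hg : GoodAt cs p) :
    ∀ acc, stepA cs acc p =
      if filterKeys.any (fun k => PySem.Chars.isIn k (valuePort ((cs.drop p).take (findGt cs (cs.length + 1) p - p))))
      then acc
      else acc ++ (',' :: ' ' :: valuePort ((cs.drop p).take (findGt cs (cs.length + 1) p - p))) := by
  obtain ⟨x0, hxl, hpx, hgt, hnogt, a, hax, ha5, hans, hasp, b, hbx, hba, hbns, hbsp,
    c, hcx, hcb, hcq⟩ := hg
  have hx : findGt cs (cs.length + 1) p = x0 :=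
    findGt_spec cs (cs.length + 1) p x0 hpx hxl hgt hnogt (by omega)
  set t := (cs.drop p).take (x0 - p) with ht
  have htlen : t.length = x0 - p := by
    simp [ht]
    omega
  have htget : ∀ r, r < x0 - p → t.getD r ' ' = cs.getD (p + r) ' ' := by
    intro r hr
    simp only [ht, List.getD_eq_getElem?_getD]
    rw [List.getElem?_take_of_lt hr, List.getElem?_drop]
  have hx5 : p + 5 < x0 := by omega
  have h0 : tPat <+: t := by
    have hcs := (match_iff cs p).mp hm
    have := (match_iff t 0).mpr ⟨by omega, fun k hk => by
      rw [Nat.zero_add, htget k (by omega)]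
      exact hcs.2 k hk⟩
    simpa using this
  have hval : FETCHERport t = valuePort t := by
    refine value_eq t h0 ⟨a - p, by omega, by omega, ?_, ?_, b - p, by omega, by omega, ?_, ?_,
      c - p, by omega, by omega, ?_⟩
    · rw [htget (a - p) (by omega), (by omega : p + (a - p) = a)]
      exact hans
    · intro k hk1 hk2
      rw [htget k (by omega)]
      exact hasp (p + k) (by omega) (by omega)
    · rw [htget (b - p) (by omega), (by omega : p + (b - p) = b)]
      exact hbns
    · intro k hk1 hk2
      rw [htget k (by omega)]
      exact hbsp (p + k) (by omega) (by omega)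
    · rw [htget (c - p) (by omega), (by omega : p + (c - p) = c)]
      exact hcq
  intro acc
  simp only [stepA, hx, ← ht, hval]
  cases hA : (filterKeys.any fun k => PySem.Chars.isIn k (valuePort t)) with
  | false =>
    rw [if_pos ((ok_iff _).mpr hA)]
    simp
  | true =>
    have hok : ¬ okLoop (valuePort t) filterKeys = 1 := by
      intro h
      have := (ok_iff _).mp h
      rw [hA] at this
      cases this
    rw [if_neg hok]
    simp

-- the value kept at occurrence p (B's extraction)
def limoAtB (cs : List Char) (p : Nat) : List Char :=
  valuePort ((cs.drop p).take (findGt cs (cs.length + 1) p - p))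

def keepAt (cs : List Char) (p : Nat) : Bool :=
  !(filterKeys.any (fun k => PySem.Chars.isIn k (limoAtB cs p)))

def valsOf (cs : List Char) (occs : List Nat) : List (List Char) :=
  occs.filterMap fun p => if keepAt cs p then some (limoAtB cs p) else none

lemma valsOf_cons (cs : List Char) (p : Nat) (occs : List Nat) :
    valsOf cs (p :: occs) = (if keepAt cs p then [limoAtB cs p] else []) ++ valsOf cs occs := by
  unfold valsOf
  rw [List.filterMap_cons]
  cases h : keepAt cs p <;> simp

lemma stepB_eq (cs : List Char) (parts : List (List Char)) (p : Nat) :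
    stepB cs parts p = parts ++ (if keepAt cs p then [limoAtB cs p] else []) := by
  unfold stepB keepAt limoAtB
  cases h : (filterKeys.any fun k => PySem.Chars.isIn k
      (valuePort ((cs.drop p).take (findGt cs (cs.length + 1) p - p)))) <;>
    simp [h]

lemma foldB_eq (cs : List Char) :
    ∀ occs parts, occs.foldl (stepB cs) parts = parts ++ valsOf cs occs := by
  intro occs
  induction occs with
  | nil => simp [valsOf]
  | cons p occs ih =>
    intro parts
    rw [List.foldl_cons, stepB_eq, ih, valsOf_cons, List.append_assoc]

lemma foldA_eq (cs : List Char) :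
    ∀ occs l, (∀ p ∈ occs, tPat <+: cs.drop p ∧ GoodAt cs p) →
      occs.foldl (stepA cs) l = l ++ (valsOf cs occs).flatMap (fun v => ',' :: ' ' :: v) := by
  intro occs
  induction occs with
  | nil => intro l _; simp [valsOf]
  | cons p occs ih =>
    intro l h
    have hp := h p (by simp)
    rw [List.foldl_cons, step_eq cs p hp.1 hp.2 l, ih _ (fun q hq => h q (by simp [hq])),
      valsOf_cons]
    simp only [keepAt, limoAtB]
    cases hA : (filterKeys.any fun k => PySem.Chars.isIn k
        (valuePort ((cs.drop p).take (findGt cs (cs.length + 1) p - p)))) with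
    | false => simp
    | true => simp

lemma join_eq : ∀ vs l, PySem.Chars.join [',', ' '] (l :: vs) = l ++ vs.flatMap (fun v => ',' :: ' ' :: v) := by
  intro vs
  induction vs with
  | nil => intro l; simp [PySem.Chars.join_singleton]
  | cons v vs ih =>
    intro l
    rw [PySem.Chars.join_cons_cons, ih]
    simp

lemma goodAtB_iff (cs : List Char) (p : Nat) : goodAtB cs p = true ↔ GoodAt cs p := by
  unfold goodAtB GoodAt
  simp only [List.any_eq_true, List.all_eq_true, List.mem_range, Bool.and_eq_true,
    Bool.or_eq_true, decide_eq_true_eq, beq_iff_eq, bne_iff_ne, ne_eq]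
  constructor
  · rintro ⟨x, hx, ⟨⟨⟨hpx, hgt⟩, hno⟩, a, hax, ⟨⟨⟨ha5, hans⟩, hsp⟩,
      b, hbx, ⟨⟨⟨hba, hbns⟩, hsb⟩, c, hcx, hcc, hcq⟩⟩⟩⟩
    refine ⟨x, hx, hpx, hgt, fun k hk1 hk2 => (hno k hk2).resolve_left (by omega),
      a, hax, ha5, hans, fun k hk1 hk2 => (hsp k hk2).resolve_left (by omega),
      b, hbx, hba, hbns, fun k hk1 hk2 => (hsb k hk2).resolve_left (by omega),
      c, hcx, hcc, hcq⟩
  · rintro ⟨x, hx, hpx, hgt, hno, a, hax, ha5, hans, hsp, b, hbx, hba, hbns, hsb,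
      c, hcx, hcc, hcq⟩
    refine ⟨x, hx, ⟨⟨⟨hpx, hgt⟩, fun k hk => ?_⟩, a, hax, ⟨⟨⟨ha5, hans⟩, fun k hk => ?_⟩,
      b, hbx, ⟨⟨⟨hba, hbns⟩, fun k hk => ?_⟩, c, hcx, hcc, hcq⟩⟩⟩⟩
    · by_cases hlt : k < p
      · exact Or.inl hlt
      · exact Or.inr (hno k (by omega) hk)
    · by_cases hlt : k < p + 5
      · exact Or.inl hlt
      · exact Or.inr (hsp k (by omega) hk)
    · by_cases hlt : k < a + 1
      · exact Or.inl hlt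
      · exact Or.inr (hsb k (by omega) hk)

lemma pre_good (link string : String) (hp : Pre_fetchComponents link string) :
    ∀ p ∈ occsGE string.toList 0, tPat <+: string.toList.drop p ∧ GoodAt string.toList p := by
  intro p hpocc
  unfold occsGE at hpocc
  rw [List.mem_filter] at hpocc
  obtain ⟨hmem, hdec⟩ := hpocc
  have hrange := List.mem_range'_1.mp hmem
  have hpre : tPat <+: string.toList.drop p := of_decide_eq_true hdec
  exact ⟨hpre, (goodAtB_iff _ _).mp
    (hp p (List.mem_range.mpr (by omega)) hpre)⟩

-- ===== VERDICT (by name: the statement is the Claim_ definition above) =====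
theorem fetchComponents_spec : Claim_equal_fetchComponents := by
  intro link string hdom hpre
  unfold Spec_fetchComponents
  show fetchComponents link string = fetchComponents_alt link string
  have hgood := pre_good link string hpre
  show String.ofList
      ((kmpSearch tPat string.toList 0 string.toList.length []).foldl
        (stepA string.toList) link.toList) =
    String.ofList (PySem.Chars.join [',', ' ']
      (bLoop string.toList (string.toList.length + 1) 0 [link.toList]))
  rw [kmpA, bLoop_main string.toList (string.toList.length + 1) 0 [link.toList]
      (by omega) (by omega), foldB_eq,
    foldA_eq string.toList _ link.toList hgood, List.singleton_append, join_eq]
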